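-- pv_equiv track=rewrite | github.com/SrinidhiBalasubramanian/Mahanvesa | RAG/rag_core.py | _group_consecutive_entities
-- ===== SOURCE A (Python) =====
-- def _group_consecutive_entities(entities):
--     if not entities: return []
--     groups = []
--     current_group = [entities[0]]
--     for prev, curr in zip(entities, entities[1:]):
--         try:
--             if int(curr[1:]) == int(prev[1:]) + 1:
--                 current_group.append(curr)
--             else:
--                 groups.append(current_group)
--                 current_group = [curr]
--         except ValueError: # Handle non-numeric entity IDs if they exist
--             groups.append(current_group)
--             current_group = [curr]
--     groups.append(current_group)
--     return groups
-- ===== SOURCE B (Python) =====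
-- def _group_consecutive_entities(entities):
--     # find-boundaries-then-partition: precompute suffixes, list break indices, slice.
--     if not entities:
--         return []
--     def _suffix(s):
--         try:
--             return int(s[1:])
--         except ValueError:
--             return None
--     sufs = [_suffix(e) for e in entities]
--     breaks = [i for i, (a, b) in enumerate(zip(sufs, sufs[1:]), 1)
--               if a is None or b is None or b != a + 1]
--     bounds = [0] + breaks + [len(entities)]
--     return [entities[a:b] for a, b in zip(bounds, bounds[1:])]
-- ===== Notes on version B (the rewrite author's own statement) =====
-- stated objective: alternative
-- what changed: Replaced the single-pass accumulate-and-flush loop (mutable current_group flushed into groups) by a find-boundaries-then-partition scheme: precompute all suffix parses once, list the break indices in one comprehension, then slice the input at those boundaries.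
import Mathlib
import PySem

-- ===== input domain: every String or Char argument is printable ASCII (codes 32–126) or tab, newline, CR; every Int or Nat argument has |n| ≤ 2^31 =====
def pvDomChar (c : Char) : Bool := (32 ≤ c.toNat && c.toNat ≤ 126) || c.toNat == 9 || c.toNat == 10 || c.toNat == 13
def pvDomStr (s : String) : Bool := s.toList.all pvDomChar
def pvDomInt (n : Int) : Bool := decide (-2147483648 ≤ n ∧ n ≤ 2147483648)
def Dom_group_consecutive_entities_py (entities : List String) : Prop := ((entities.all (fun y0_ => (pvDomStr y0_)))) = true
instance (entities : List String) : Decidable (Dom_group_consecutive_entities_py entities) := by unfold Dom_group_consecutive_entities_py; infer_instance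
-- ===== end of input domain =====

-- B replaces A's accumulate-and-flush loop by a find-break-indices-then-slice decomposition (alternative algorithm, same cost).


-- ===== PORT A =====
-- int(s[1:]) as both Pythons compute it (none = ValueError); A inlines it, B's _suffix helper is the same expression
def pvSfx (s : String) : Option Int := PySem.Int.ofStr? (PySem.Str.slice s (some 1) none)

-- A's for-loop over zip(entities, entities[1:]) with state (groups, current_group); the try/except is the wildcard match arm
def pvLoopA : List (String × String) → List (List String) → List String → List (List String)
  | [], groups, cur => groups ++ [cur]
  | (p, c) :: rest, groups, cur =>
    match pvSfx c, pvSfx p with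
    | some a, some b =>
      if a = b + 1 then pvLoopA rest groups (cur ++ [c])
      else pvLoopA rest (groups ++ [cur]) [c]
    | _, _ => pvLoopA rest (groups ++ [cur]) [c]

def group_consecutive_entities_py (entities : List String) : List (List String) :=
  match entities with
  | [] => []
  | x :: xs => pvLoopA ((x :: xs).zip xs) [] [x]

-- ===== PORT B =====
-- Source B's break test: either suffix is None or curr suffix ≠ prev suffix + 1
def pvBad (p : Option Int × Option Int) : Bool :=
  match p.1, p.2 with
  | some a, some b => decide (b ≠ a + 1)
  | _, _ => true

def group_consecutive_entities_py_alt (entities : List String) : List (List String) :=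
  if entities = [] then []
  else
    let sufs := entities.map pvSfx
    let breaks := ((PySem.List.enumerate (sufs.zip sufs.tail) 1).filter (fun q => pvBad q.2)).map (·.1)
    let bounds := 0 :: breaks ++ [(entities.length : Int)]
    (bounds.zip bounds.tail).map (fun q => PySem.List.slice entities (some q.1) (some q.2))

-- ===== PRECONDITION & SPEC =====
def Spec_group_consecutive_entities_py (entities : List String) (out : List (List String)) : Prop := out = group_consecutive_entities_py_alt entities
instance (entities : List String) (out : List (List String)) : Decidable (Spec_group_consecutive_entities_py entities out) := by unfold Spec_group_consecutive_entities_py; infer_instance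

-- ===== CLAIM (what is proved, stated in full; the proofs are below) =====
def Claim_equal_group_consecutive_entities_py : Prop := ∀ (entities : List String), Dom_group_consecutive_entities_py entities → Spec_group_consecutive_entities_py entities (group_consecutive_entities_py entities)

-- ===== LEMMAS AND PROOFS =====

-- canonical recursive grouping: (rest of the group that x starts, the later groups)
def pvGrp : String → List String → List String × List (List String)
  | _, [] => ([], [])
  | x, y :: ys =>
    let r := pvGrp y ys
    match pvSfx y, pvSfx x with
    | some a, some b =>
      if a = b + 1 then (y :: r.1, r.2) else ([], (y :: r.1) :: r.2)
    | _, _ => ([], (y :: r.1) :: r.2)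

-- A-side: the loop invariant
theorem pvLoopA_eq (xs : List String) : ∀ (x : String) (groups : List (List String)) (cur : List String),
    pvLoopA ((x :: xs).zip xs) groups cur
      = groups ++ (cur ++ (pvGrp x xs).1) :: (pvGrp x xs).2 := by
  induction xs with
  | nil => intro x groups cur; simp [pvLoopA, pvGrp]
  | cons y ys ih =>
    intro x groups cur
    show pvLoopA ((x, y) :: (y :: ys).zip ys) groups cur = _
    rw [pvLoopA]
    simp only [pvGrp]
    cases hy : pvSfx y with
    | none => simp [ih]
    | some a =>
      cases hx : pvSfx x with
      | none => simp [ih]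
      | some b =>
        by_cases hab : a = b + 1 <;> simp [hab, ih]

-- B-side: the enumerate/filter/map break-index expression, as a recursion
def pvBrkE (l : List (Option Int × Option Int)) (s : Int) : List Int :=
  ((PySem.List.enumerate l s).filter (fun q => pvBad q.2)).map (·.1)

theorem pvBrkE_cons (z : Option Int × Option Int) (l : List (Option Int × Option Int)) (s : Int) :
    pvBrkE (z :: l) s = (if pvBad z then [s] else []) ++ pvBrkE l (s + 1) := by
  simp [pvBrkE, PySem.List.enumerate_cons, List.filter_cons]
  split <;> simp

theorem pvBrkE_nil (s : Int) : pvBrkE [] s = [] := by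
  simp [pvBrkE, PySem.List.enumerate_nil]

theorem pvBrkE_shift (l : List (Option Int × Option Int)) (s : Int) :
    pvBrkE l (s + 1) = (pvBrkE l s).map (· + 1) := by
  induction l generalizing s with
  | nil => simp [pvBrkE_nil]
  | cons z l ih => rw [pvBrkE_cons, pvBrkE_cons, ih (s+1)]; split <;> simp [ih]

theorem pvBrkE_ge (l : List (Option Int × Option Int)) (s : Int) :
    ∀ i ∈ pvBrkE l s, s ≤ i := by
  induction l generalizing s with
  | nil => simp [pvBrkE_nil]
  | cons z l ih =>
    rw [pvBrkE_cons]
    intro i hi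
    rcases List.mem_append.1 hi with h | h
    · split at h <;> simp_all
    · have := ih (s+1) i h; omega

-- slicing at shifted bounds drops the head
theorem pvSlice_shift (x : String) (l : List String) (a b : Int) (ha : 0 ≤ a) (hb : 0 ≤ b) :
    PySem.List.slice (x :: l) (some (a + 1)) (some (b + 1)) = PySem.List.slice l (some a) (some b) := by
  rw [PySem.List.slice_toNat _ (by omega : (0:Int) ≤ a+1) (by omega : (0:Int) ≤ b+1), PySem.List.slice_toNat _ ha hb]
  have h1 : (a+1).toNat = a.toNat + 1 := by omega
  have h2 : (b+1).toNat = b.toNat + 1 := by omega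
  simp [h1, h2]

-- B's second pass: slice at consecutive bounds
def pvSlices (es : List String) (L : List Int) : List (List String) :=
  (L.zip L.tail).map (fun q => PySem.List.slice es (some q.1) (some q.2))

theorem pvSlices_cons₂ (es : List String) (a b : Int) (L : List Int) :
    pvSlices es (a :: b :: L) = PySem.List.slice es (some a) (some b) :: pvSlices es (b :: L) := by
  simp [pvSlices]

theorem pvSlices_shift (x : String) (l : List String) (L : List Int) (h : ∀ i ∈ L, 0 ≤ i) :
    pvSlices (x :: l) (L.map (· + 1)) = pvSlices l L := by
  unfold pvSlices
  rw [show (L.map (· + 1)).tail = L.tail.map (· + 1) by rw [List.map_tail], List.zip_map]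
  rw [List.map_map]
  apply List.map_congr_left
  intro q hq
  obtain ⟨h1, h2⟩ := List.of_mem_zip hq
  exact pvSlice_shift x l q.1 q.2 (h _ h1) (h _ (List.mem_of_mem_tail h2))

theorem pvSlice_zero_succ (x : String) (l : List String) (c : Int) (hc : 0 ≤ c) :
    PySem.List.slice (x :: l) (some 0) (some (c + 1)) = x :: PySem.List.slice l (some 0) (some c) := by
  rw [PySem.List.slice_toNat _ (le_refl 0) (by omega : (0:Int) ≤ c+1), PySem.List.slice_toNat _ (le_refl 0) hc]
  have h2 : (c+1).toNat = c.toNat + 1 := by omega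
  simp [h2]

-- B-side main lemma: slicing at the break bounds yields the canonical grouping
theorem pvB_core (xs : List String) : ∀ (x : String),
    pvSlices (x :: xs)
      (0 :: pvBrkE (((x :: xs).map pvSfx).zip ((x :: xs).map pvSfx).tail) 1 ++ [((x :: xs).length : Int)])
      = (x :: (pvGrp x xs).1) :: (pvGrp x xs).2 := by
  induction xs with
  | nil =>
    intro x
    simp only [List.map, List.tail, List.zip_nil_right, pvBrkE_nil, List.nil_append, List.length,
      pvGrp]
    norm_num
    rw [pvSlices_cons₂]
    rw [PySem.List.slice_toNat _ (le_refl (0:Int)) (by omega : (0:Int) ≤ 1)]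
    simp [pvSlices]
  | cons y ys ih =>
    intro x
    have hpairs : ((x :: y :: ys).map pvSfx).zip ((x :: y :: ys).map pvSfx).tail
        = (pvSfx x, pvSfx y) :: (((y :: ys).map pvSfx).zip ((y :: ys).map pvSfx).tail) := by
      simp [List.zip]
    set B' := pvBrkE (((y :: ys).map pvSfx).zip ((y :: ys).map pvSfx).tail) 1 with hB'
    have hge : ∀ i ∈ B', (1:Int) ≤ i := pvBrkE_ge _ 1
    set n' : Int := ((y :: ys).length : Int) with hn'
    have hlen : ((x :: y :: ys).length : Int) = n' + 1 := by simp [hn']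
    have hbrk : pvBrkE (((x :: y :: ys).map pvSfx).zip ((x :: y :: ys).map pvSfx).tail) 1
        = (if pvBad (pvSfx x, pvSfx y) then [1] else []) ++ B'.map (· + 1) := by
      rw [hpairs, pvBrkE_cons, pvBrkE_shift]
    have hnn : ∀ i ∈ (0 : Int) :: (B' ++ [n']), 0 ≤ i := by
      intro i hi
      rcases List.mem_cons.1 hi with h | h
      · omega
      rcases List.mem_append.1 h with h | h
      · have := hge i h; omega
      · simp at h; simp [h, hn']; positivity
    have ihy := ih y
    simp only [List.cons_append] at ihy
    rw [hbrk, hlen]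
    simp only [List.cons_append, List.singleton_append, List.nil_append]
    by_cases hbad : pvBad (pvSfx x, pvSfx y) = true
    · -- break between x and y: x's group is [x], y starts the rest
      rw [if_pos hbad]
      simp only [List.singleton_append, List.cons_append, List.nil_append]
      rw [pvSlices_cons₂]
      have hsh : (1:Int) :: (B'.map (· + 1) ++ [n' + 1]) = ((0:Int) :: (B' ++ [n'])).map (· + 1) := by
        simp
      rw [hsh, pvSlices_shift x (y :: ys) _ hnn, ihy]
      have hx1 : PySem.List.slice (x :: y :: ys) (some 0) (some 1) = [x] := by
        rw [PySem.List.slice_toNat _ (le_refl (0:Int)) (by omega : (0:Int) ≤ 1)]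
        rfl
      rw [hx1]
      have hgx : pvGrp x (y :: ys) = ([], (y :: (pvGrp y ys).1) :: (pvGrp y ys).2) := by
        rw [pvGrp]
        cases hy : pvSfx y with
        | none => simp
        | some a =>
          cases hx : pvSfx x with
          | none => simp
          | some b =>
            have : a ≠ b + 1 := by
              intro hab
              simp [pvBad, hy, hx, hab] at hbad
            simp [this]
      rw [hgx]
    · -- x's group continues with y
      rw [if_neg hbad]
      simp only [List.nil_append]
      obtain ⟨a, b, hy, hx, hab⟩ : ∃ a b, pvSfx y = some a ∧ pvSfx x = some b ∧ a = b + 1 := by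
        revert hbad
        cases hy : pvSfx y <;> cases hx : pvSfx x <;> simp [pvBad]
      obtain ⟨c, cs, hL⟩ := List.exists_cons_of_ne_nil (by simp : B' ++ [n'] ≠ [])
      have hc0 : 0 ≤ c := hnn c (by rw [hL]; simp)
      have hcs : ∀ i ∈ c :: cs, 0 ≤ i := by
        intro i hi; apply hnn; rw [hL]; simp [hi]
      have hmap : B'.map (· + 1) ++ [n' + 1] = (c + 1) :: cs.map (· + 1) := by
        have h := congrArg (List.map (· + 1)) hL
        simpa using h
      rw [hmap, pvSlices_cons₂, pvSlice_zero_succ x (y :: ys) c hc0,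
        show ((c + 1) :: cs.map (· + 1)) = (c :: cs).map (· + 1) by simp,
        pvSlices_shift x (y :: ys) _ hcs]
      rw [hL, pvSlices_cons₂] at ihy
      have ih1 : PySem.List.slice (y :: ys) (some 0) (some c) = y :: (pvGrp y ys).1 :=
        (List.cons.injEq _ _ _ _ ▸ ihy).1
      have ih2 : pvSlices (y :: ys) (c :: cs) = (pvGrp y ys).2 :=
        (List.cons.injEq _ _ _ _ ▸ ihy).2
      rw [ih1, ih2]
      have hgx : pvGrp x (y :: ys) = (y :: (pvGrp y ys).1, (pvGrp y ys).2) := by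
        rw [pvGrp]
        simp [hy, hx, hab]
      rw [hgx]

-- ===== VERDICT (by name: the statement is the Claim_ definition above) =====
theorem group_consecutive_entities_py_spec : Claim_equal_group_consecutive_entities_py := by
  intro entities _
  unfold Spec_group_consecutive_entities_py
  cases entities with
  | nil => rfl
  | cons x xs =>
    show pvLoopA ((x :: xs).zip xs) [] [x] = _
    rw [pvLoopA_eq]
    simp only [List.nil_append, List.singleton_append]
    rw [← pvB_core xs x]
    simp [group_consecutive_entities_py_alt, pvSlices, pvBrkE]
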